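-- pv_equiv track=rewrite | github.com/mmanav02/Sift | server/app/services/data_sources.py | _eonet_category_to_type
-- ===== SOURCE A (Python) =====
-- def _eonet_category_to_type(categories: list[str]) -> str:
--     cats = [c.lower() for c in categories]
--     if any("wildfire" in c or "fire" in c for c in cats):
--         return "fire"
--     if any("flood" in c for c in cats):
--         return "flood"
--     if any("tsunami" in c for c in cats):
--         return "tsunami"
--     if any("earthquake" in c or "landslide" in c for c in cats):
--         return "earthquake"
--     if any("storm" in c or "cyclone" in c or "hurricane" in c or "typhoon" in c for c in cats):
--         return "storm"
--     return "other"
-- ===== SOURCE B (Python) =====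
-- # Category-major single pass over a priority-ordered keyword table, keeping
-- # the minimal matched priority; A is type-major with one scan per type.
-- _TABLE = [
--     ("fire", ["wildfire", "fire"]),
--     ("flood", ["flood"]),
--     ("tsunami", ["tsunami"]),
--     ("earthquake", ["earthquake", "landslide"]),
--     ("storm", ["storm", "cyclone", "hurricane", "typhoon"]),
-- ]
--
-- def _eonet_category_to_type(categories: list[str]) -> str:
--     best = len(_TABLE)
--     for c in categories:
--         lc = c.lower()
--         for i, (_, kws) in enumerate(_TABLE):
--             if i < best and any(k in lc for k in kws):
--                 best = i
--     return _TABLE[best][0] if best < len(_TABLE) else "other"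
-- ===== Notes on version B (the rewrite author's own statement) =====
-- stated objective: alternative
-- what changed: Replaces A's type-major sequence of any-scans (one pass over the category list per disaster type, early return) by a priority-ordered keyword table and a single category-major pass that maintains the minimal matched priority index, resolved to a type at the end.
import Mathlib
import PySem

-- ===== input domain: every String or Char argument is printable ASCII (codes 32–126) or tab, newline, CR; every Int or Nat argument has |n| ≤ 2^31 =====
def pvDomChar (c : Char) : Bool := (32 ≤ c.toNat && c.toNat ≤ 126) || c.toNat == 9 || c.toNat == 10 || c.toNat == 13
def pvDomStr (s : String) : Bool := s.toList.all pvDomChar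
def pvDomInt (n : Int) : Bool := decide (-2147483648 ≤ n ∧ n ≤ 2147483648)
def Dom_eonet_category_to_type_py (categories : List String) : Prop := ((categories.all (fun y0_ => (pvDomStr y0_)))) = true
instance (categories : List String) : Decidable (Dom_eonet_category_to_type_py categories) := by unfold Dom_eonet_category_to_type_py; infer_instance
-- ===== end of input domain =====

-- B replaces A's type-major any-scans by one category-major pass over a priority keyword table (return value only; alternative decomposition).


-- ===== PORT A =====
def eonet_category_to_type_py (categories : List String) : String :=
  let cats := categories.map (fun c => PySem.Str.lower c)
  if cats.any (fun c => PySem.Str.isIn "wildfire" c || PySem.Str.isIn "fire" c) then "fire"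
  else if cats.any (fun c => PySem.Str.isIn "flood" c) then "flood"
  else if cats.any (fun c => PySem.Str.isIn "tsunami" c) then "tsunami"
  else if cats.any (fun c => PySem.Str.isIn "earthquake" c || PySem.Str.isIn "landslide" c) then "earthquake"
  else if cats.any (fun c => PySem.Str.isIn "storm" c || PySem.Str.isIn "cyclone" c || PySem.Str.isIn "hurricane" c || PySem.Str.isIn "typhoon" c) then "storm"
  else "other"

-- ===== PORT B =====
def pvTable : List (String × List String) :=
  [("fire", ["wildfire", "fire"]),
   ("flood", ["flood"]),
   ("tsunami", ["tsunami"]),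
   ("earthquake", ["earthquake", "landslide"]),
   ("storm", ["storm", "cyclone", "hurricane", "typhoon"])]

-- the inner 'for i, (_, kws) in enumerate(_TABLE)' loop of Source B
def pvStep (best : Nat) (lc : String) : Nat :=
  (PySem.List.enumerate pvTable).foldl
    (fun b p => if (p.1 : Int) < (b : Int) ∧ p.2.2.any (fun k => PySem.Str.isIn k lc) = true then p.1.toNat else b)
    best

def eonet_category_to_type_py_alt (categories : List String) : String :=
  let best := categories.foldl (fun b c => pvStep b (PySem.Str.lower c)) pvTable.length
  if h : best < pvTable.length then (pvTable[best]'h).1 else "other"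

-- ===== PRECONDITION & SPEC =====
def Spec_eonet_category_to_type_py (categories : List String) (out : String) : Prop := out = eonet_category_to_type_py_alt categories
instance (categories : List String) (out : String) : Decidable (Spec_eonet_category_to_type_py categories out) := by unfold Spec_eonet_category_to_type_py; infer_instance

-- ===== CLAIM (what is proved, stated in full; the proofs are below) =====
def Claim_equal_eonet_category_to_type_py : Prop := ∀ (categories : List String), Dom_eonet_category_to_type_py categories → Spec_eonet_category_to_type_py categories (eonet_category_to_type_py categories)

-- ===== LEMMAS AND PROOFS =====

-- the five per-category match booleans (priority order of pvTable / A's branch order)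
def pvM0 (c : String) : Bool := PySem.Str.isIn "wildfire" (PySem.Str.lower c) || PySem.Str.isIn "fire" (PySem.Str.lower c)
def pvM1 (c : String) : Bool := PySem.Str.isIn "flood" (PySem.Str.lower c)
def pvM2 (c : String) : Bool := PySem.Str.isIn "tsunami" (PySem.Str.lower c)
def pvM3 (c : String) : Bool := PySem.Str.isIn "earthquake" (PySem.Str.lower c) || PySem.Str.isIn "landslide" (PySem.Str.lower c)
def pvM4 (c : String) : Bool := PySem.Str.isIn "storm" (PySem.Str.lower c) || (PySem.Str.isIn "cyclone" (PySem.Str.lower c) || (PySem.Str.isIn "hurricane" (PySem.Str.lower c) || PySem.Str.isIn "typhoon" (PySem.Str.lower c)))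

-- index of the first true among the five booleans, 5 if none
def pvLeast (a0 a1 a2 a3 a4 : Bool) : Nat :=
  if a0 then 0 else if a1 then 1 else if a2 then 2 else if a3 then 3 else if a4 then 4 else 5

theorem pvLeast_le (a0 a1 a2 a3 a4 : Bool) : pvLeast a0 a1 a2 a3 a4 ≤ 5 := by
  revert a0 a1 a2 a3 a4; decide

theorem pvLeast_min (a0 a1 a2 a3 a4 b0 b1 b2 b3 b4 : Bool) :
    min (pvLeast a0 a1 a2 a3 a4) (pvLeast b0 b1 b2 b3 b4)
      = pvLeast (a0 || b0) (a1 || b1) (a2 || b2) (a3 || b3) (a4 || b4) := by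
  revert a0 a1 a2 a3 a4 b0 b1 b2 b3 b4; decide

-- Source B's inner table loop computes the min of the incoming best and the first matched priority
theorem pvStep_eq (b : Nat) (c : String) (hb : b ≤ 5) :
    pvStep b (PySem.Str.lower c)
      = min b (pvLeast (pvM0 c) (pvM1 c) (pvM2 c) (pvM3 c) (pvM4 c)) := by
  cases h0 : pvM0 c <;> cases h1 : pvM1 c <;> cases h2 : pvM2 c <;>
    cases h3 : pvM3 c <;> cases h4 : pvM4 c <;>
  · simp only [pvStep, pvTable, PySem.List.enumerate_cons, PySem.List.enumerate_nil,
      List.foldl_cons, List.foldl_nil, List.any_cons, List.any_nil, Bool.or_false, pvLeast] at *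
    simp only [pvM0, pvM1, pvM2, pvM3, pvM4] at h0 h1 h2 h3 h4
    simp only [h0, h1, h2, h3, h4, and_true]
    first
    | omega
    | (norm_num
       all_goals first
       | omega
       | (split_ifs <;> omega))

-- the outer pass over the categories keeps the min matched priority
theorem pvFold_eq (cats : List String) : ∀ b : Nat, b ≤ 5 →
    cats.foldl (fun b c => pvStep b (PySem.Str.lower c)) b
      = min b (pvLeast (cats.any pvM0) (cats.any pvM1) (cats.any pvM2) (cats.any pvM3) (cats.any pvM4)) := by
  induction cats with
  | nil => intro b hb; simp [pvLeast]; omega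
  | cons c cs ih =>
    intro b hb
    simp only [List.foldl_cons, List.any_cons]
    rw [pvStep_eq b c hb,
        ih _ (by have := pvLeast_le (pvM0 c) (pvM1 c) (pvM2 c) (pvM3 c) (pvM4 c); omega),
        Nat.min_assoc, pvLeast_min]

theorem pvFinal (a0 a1 a2 a3 a4 : Bool) :
    (if a0 = true then "fire" else if a1 = true then "flood" else if a2 = true then "tsunami"
     else if a3 = true then "earthquake" else if a4 = true then "storm" else "other")
      = (if h : pvLeast a0 a1 a2 a3 a4 < pvTable.length then (pvTable[pvLeast a0 a1 a2 a3 a4]'h).1 else "other") := by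
  revert a0 a1 a2 a3 a4; decide

theorem pvA_eq (cats : List String) :
    eonet_category_to_type_py cats
      = (if cats.any pvM0 = true then "fire" else if cats.any pvM1 = true then "flood"
         else if cats.any pvM2 = true then "tsunami" else if cats.any pvM3 = true then "earthquake"
         else if cats.any pvM4 = true then "storm" else "other") := by
  simp only [eonet_category_to_type_py, List.any_map, Function.comp_def, Bool.or_assoc]
  rfl

theorem pvB_eq (cats : List String) :
    eonet_category_to_type_py_alt cats
      = (if h : pvLeast (cats.any pvM0) (cats.any pvM1) (cats.any pvM2) (cats.any pvM3) (cats.any pvM4) < pvTable.length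
         then (pvTable[pvLeast (cats.any pvM0) (cats.any pvM1) (cats.any pvM2) (cats.any pvM3) (cats.any pvM4)]'h).1
         else "other") := by
  unfold eonet_category_to_type_py_alt
  have hb : cats.foldl (fun b c => pvStep b (PySem.Str.lower c)) pvTable.length
      = pvLeast (cats.any pvM0) (cats.any pvM1) (cats.any pvM2) (cats.any pvM3) (cats.any pvM4) := by
    rw [show pvTable.length = 5 from rfl, pvFold_eq cats 5 le_rfl]
    exact Nat.min_eq_right (pvLeast_le _ _ _ _ _)
  simp only [hb]

-- ===== VERDICT (by name: the statement is the Claim_ definition above) =====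
theorem eonet_category_to_type_py_spec : Claim_equal_eonet_category_to_type_py := by
  intro cats _
  unfold Spec_eonet_category_to_type_py
  rw [pvA_eq, pvB_eq, pvFinal]
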